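-- pv_equiv track=rewrite | github.com/DonnyWhoLovedBowling/aoc2020 | src/18_2.py | do_multiplications
-- ===== SOURCE A (Python) =====
-- def parse_num(ix, line):
--     num = ''
--     stop_ix = len(line)
--     while line[ix].isnumeric():
--         num += line[ix]
--         ix += 1
--         if ix >= stop_ix:
--             break
--     return int(num), ix
--
-- def do_multiplications(line):
--     ix = 0
--     total = 1
--     while ix < len(line):
--         if line[ix].isnumeric():
--             num, ix = parse_num(ix, line)
--             total *= num
--         else:
--             ix += 1
--     return total
-- ===== SOURCE B (Python) =====
-- def do_multiplications(line):
--     # One pass with a (total, run) accumulator: collect maximal numeric runs,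
--     # flush each run into the product at the first non-numeric char / end.
--     total = 1
--     run = ''
--     for ch in line:
--         if ch.isnumeric():
--             run += ch
--         else:
--             if run:
--                 total *= int(run)
--             run = ''
--     if run:
--         total *= int(run)
--     return total
-- ===== Notes on version B (the rewrite author's own statement) =====
-- stated objective: simpler
-- what changed: Replaces the index-driven while loop with an inner parse_num helper scan by a single for-loop over the characters carrying a (product, current-run) accumulator that flushes each maximal numeric run at its end; the one direct iteration avoids per-character indexing and helper-call overhead.
import Mathlib
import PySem

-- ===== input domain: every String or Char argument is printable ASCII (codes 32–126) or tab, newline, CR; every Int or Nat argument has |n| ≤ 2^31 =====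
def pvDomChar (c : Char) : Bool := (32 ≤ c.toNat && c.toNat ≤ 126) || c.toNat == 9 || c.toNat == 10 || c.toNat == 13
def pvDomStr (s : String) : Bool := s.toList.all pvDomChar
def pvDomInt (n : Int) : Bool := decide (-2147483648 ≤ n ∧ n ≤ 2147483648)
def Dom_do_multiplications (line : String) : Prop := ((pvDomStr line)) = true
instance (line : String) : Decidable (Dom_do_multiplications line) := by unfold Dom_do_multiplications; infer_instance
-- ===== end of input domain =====

-- B differs from A only in decomposition: one accumulator pass instead of an
-- index-driven while loop with a parse_num helper; return values proved equal.
-- On the ASCII domain Python's str.isnumeric coincides with isdigit; both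
-- ports use PySem.Chars.isdigit (exact there).

-- ===== PORT A =====
-- parse_num's `while` with its internal `if ix >= stop_ix: break` is rendered
-- as a top-checked recursion (same behaviour: the break fires exactly when the
-- next condition check would be out of range). int(num) is always applied to a
-- nonempty digit run here, so `(ofChars? num).getD 0` never takes the default.
def parseNumA (s : List Char) (ix : Nat) (num : List Char) : Int × Nat :=
  if h : ix < s.length then
    if PySem.Chars.isdigit s[ix] then
      parseNumA s (ix + 1) (num ++ [s[ix]])
    else
      ((PySem.Int.ofChars? num).getD 0, ix)
  else
    ((PySem.Int.ofChars? num).getD 0, ix)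
termination_by s.length - ix

-- the helper's returned index never moves backwards (A's port needs this to terminate)
theorem parseNumA_snd_ge (s : List Char) (ix : Nat) (num : List Char) :
    ix ≤ (parseNumA s ix num).2 := by
  rw [parseNumA]
  split
  · split
    · exact le_trans (Nat.le_succ ix) (parseNumA_snd_ge s (ix + 1) _)
    · exact le_refl ix
  · exact le_refl ix
termination_by s.length - ix

theorem parseNumA_snd_gt (s : List Char) (ix : Nat) (num : List Char)
    (h : ix < s.length) (hd : PySem.Chars.isdigit s[ix]) :
    ix < (parseNumA s ix num).2 := by
  rw [parseNumA, dif_pos h, if_pos hd]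
  exact lt_of_lt_of_le (Nat.lt_succ_self ix) (parseNumA_snd_ge s (ix + 1) _)

def loopA (s : List Char) (ix : Nat) (total : Int) : Int :=
  if h : ix < s.length then
    if hd : PySem.Chars.isdigit s[ix] then
      loopA s (parseNumA s ix []).2 (total * (parseNumA s ix []).1)
    else
      loopA s (ix + 1) total
  else
    total
termination_by s.length - ix
decreasing_by
  · have := parseNumA_snd_gt s ix [] h hd
    omega
  · omega

def do_multiplications (line : String) : Int :=
  loopA line.toList 0 1

-- ===== PORT B =====
def stepB (acc : Int × List Char) (ch : Char) : Int × List Char :=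
  if PySem.Chars.isdigit ch then (acc.1, acc.2 ++ [ch])
  else if acc.2 ≠ [] then (acc.1 * (PySem.Int.ofChars? acc.2).getD 0, [])
  else (acc.1, [])

def flushB (acc : Int × List Char) : Int :=
  if acc.2 ≠ [] then acc.1 * (PySem.Int.ofChars? acc.2).getD 0 else acc.1

def do_multiplications_alt (line : String) : Int :=
  flushB (line.toList.foldl stepB (1, []))

-- ===== PRECONDITION & SPEC =====
def Spec_do_multiplications (line : String) (out : Int) : Prop := out = do_multiplications_alt line
instance (line : String) (out : Int) : Decidable (Spec_do_multiplications line out) := by unfold Spec_do_multiplications; infer_instance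

-- ===== CLAIM (what is proved, stated in full; the proofs are below) =====
def Claim_equal_do_multiplications : Prop := ∀ (line : String), Dom_do_multiplications line → Spec_do_multiplications line (do_multiplications line)

-- ===== LEMMAS AND PROOFS =====

-- conditional unfolding lemmas for the two recursive A-side functions
theorem parseNumA_digit (s : List Char) (ix : Nat) (num : List Char)
    (h : ix < s.length) (hd : PySem.Chars.isdigit s[ix]) :
    parseNumA s ix num = parseNumA s (ix + 1) (num ++ [s[ix]]) := by
  rw [parseNumA, dif_pos h, if_pos hd]

theorem parseNumA_nondigit (s : List Char) (ix : Nat) (num : List Char)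
    (h : ix < s.length) (hd : ¬ PySem.Chars.isdigit s[ix]) :
    parseNumA s ix num = ((PySem.Int.ofChars? num).getD 0, ix) := by
  rw [parseNumA, dif_pos h, if_neg hd]

theorem parseNumA_stop (s : List Char) (ix : Nat) (num : List Char)
    (h : ¬ ix < s.length) :
    parseNumA s ix num = ((PySem.Int.ofChars? num).getD 0, ix) := by
  rw [parseNumA, dif_neg h]

theorem loopA_digit (s : List Char) (ix : Nat) (total : Int)
    (h : ix < s.length) (hd : PySem.Chars.isdigit s[ix]) :
    loopA s ix total = loopA s (parseNumA s ix []).2 (total * (parseNumA s ix []).1) := by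
  rw [loopA, dif_pos h, dif_pos hd]

theorem loopA_nondigit (s : List Char) (ix : Nat) (total : Int)
    (h : ix < s.length) (hd : ¬ PySem.Chars.isdigit s[ix]) :
    loopA s ix total = loopA s (ix + 1) total := by
  rw [loopA, dif_pos h, dif_neg hd]

theorem loopA_stop (s : List Char) (ix : Nat) (total : Int)
    (h : ¬ ix < s.length) : loopA s ix total = total := by
  rw [loopA, dif_neg h]

-- A's control state seen from position ix: empty `num` = in the outer loop,
-- nonempty `num` = in the middle of parse_num's run, with `total` pending.
def contA (s : List Char) (ix : Nat) (total : Int) (num : List Char) : Int :=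
  if num = [] then loopA s ix total
  else loopA s (parseNumA s ix num).2 (total * (parseNumA s ix num).1)

theorem contA_eq_foldl (s : List Char) (ix : Nat) (total : Int) (num : List Char) :
    contA s ix total num = flushB ((s.drop ix).foldl stepB (total, num)) := by
  by_cases h : ix < s.length
  · have hdrop : s.drop ix = s[ix] :: s.drop (ix + 1) := List.drop_eq_getElem_cons h
    rw [hdrop, List.foldl_cons]
    by_cases hd : PySem.Chars.isdigit s[ix]
    · have hstep : stepB (total, num) s[ix] = (total, num ++ [s[ix]]) := by
        simp [stepB, hd]
      rw [hstep, ← contA_eq_foldl s (ix + 1) total (num ++ [s[ix]])]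
      by_cases hn : num = []
      · subst hn
        simp only [contA, if_pos rfl, List.nil_append]
        have hne : ([s[ix]] : List Char) ≠ [] := by simp
        rw [if_neg hne, loopA_digit s ix total h hd,
            parseNumA_digit s ix [] h hd, List.nil_append]
        simp
      · have hne : num ++ [s[ix]] ≠ [] := by simp
        simp only [contA, if_neg hn, if_neg hne]
        rw [parseNumA_digit s ix num h hd]
    · have hstep : stepB (total, num) s[ix]
          = (if num ≠ [] then total * (PySem.Int.ofChars? num).getD 0 else total, []) := by
        by_cases hn : num = [] <;> simp [stepB, hd, hn]
      rw [hstep, ← contA_eq_foldl s (ix + 1) _ []]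
      by_cases hn : num = []
      · subst hn
        simp only [contA, if_pos rfl, ne_eq, not_true_eq_false, if_false]
        exact loopA_nondigit s ix total h hd
      · simp only [contA, if_neg hn, if_pos rfl, ne_eq, hn, not_false_eq_true, if_true]
        rw [parseNumA_nondigit s ix num h hd]
        exact loopA_nondigit s ix _ h hd
  · have hdrop : s.drop ix = [] := List.drop_eq_nil_of_le (Nat.le_of_not_lt h)
    rw [hdrop, List.foldl_nil]
    by_cases hn : num = []
    · subst hn
      simp only [contA, if_pos rfl, flushB, ne_eq, not_true_eq_false, if_false]
      exact loopA_stop s ix total h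
    · rw [contA, if_neg hn, parseNumA_stop s ix num h, flushB]
      simp only [ne_eq, hn, not_false_eq_true, if_true]
      exact loopA_stop s ix _ h
termination_by s.length - ix

-- ===== VERDICT (by name: the statement is the Claim_ definition above) =====
theorem do_multiplications_spec : Claim_equal_do_multiplications := by
  intro line _
  show do_multiplications line = do_multiplications_alt line
  have h := contA_eq_foldl line.toList 0 1 []
  simpa [contA, do_multiplications, do_multiplications_alt] using h
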